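-- pv_equiv track=rewrite | github.com/cgibson6279/True-casing | src/data/code/get_test_features.py | extract
-- ===== SOURCE A (Python) =====
-- from typing import List
--
-- def _suffix_feature(token: str, size: int) -> str:
--     return f"suf{size}={token[-size:].casefold()}"
--
-- def extract(tokens: List[str]) -> List[List[str]]:
--     """Feature extraction."""
--     # NB: tokens are assumed to already be case-folded.
--     vectors = [[f"t[0]={str.casefold(token)}"] for token in tokens]
--     # Edge features.
--     vectors[0].append("__BOS__")
--     vectors[-1].append("__EOS__")
--     # Preceding and following word features.
--     if len(tokens) > 1:
--         for i in range(1, len(tokens) - 1):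
--             prev_token_feat = f"t[-1]={tokens[i - 1].casefold()}"
--             next_token_feat = f"t[+1]={tokens[i + 1].casefold()}"
--             vectors[i].append(prev_token_feat)
--             vectors[i].append(next_token_feat)
--             # Conjunction of the two.
--             vectors[i].append(f"{prev_token_feat}^{next_token_feat}")
--         if len(tokens) > 2:
--             for i in range(2, len(tokens) - 2):
--                 vectors[i].append(f"t[-2]={tokens[i - 2].casefold()}")
--                 vectors[i].append(f"t[+2]={tokens[i + 2].casefold()}")
--     # Suffix features.
--     for (i, token) in enumerate(tokens):
--         vector = vectors[i]
--         if len(token) > 1: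
--             vector.append(_suffix_feature(token, 1))
--             if len(token) > 2:
--                 vector.append(_suffix_feature(token, 2))
--                 if len(token) > 3:
--                     vector.append(_suffix_feature(token, 3))
--     # And we're done.
--     return vectors
-- ===== SOURCE B (Python) =====
-- from typing import List
--
-- def _suffix_feature(token: str, size: int) -> str:
--     return f"suf{size}={token[-size:].casefold()}"
--
-- def extract(tokens: List[str]) -> List[List[str]]:
--     """Feature extraction via zipped, None-padded context streams (no index arithmetic)."""
--     prev1 = [None] + tokens[:-1]
--     next1 = tokens[1:] + [None]
--     prev2 = [None, None] + tokens[:-2]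
--     next2 = tokens[2:] + [None, None]
--     out = []
--     for tok, p1, s1, p2, s2 in zip(tokens, prev1, next1, prev2, next2):
--         feats = [f"t[0]={str.casefold(tok)}"]
--         if p1 is None:
--             feats.append("__BOS__")
--         if s1 is None:
--             feats.append("__EOS__")
--         if p1 is not None and s1 is not None:
--             pf = f"t[-1]={p1.casefold()}"
--             nf = f"t[+1]={s1.casefold()}"
--             feats += [pf, nf, f"{pf}^{nf}"]
--         if p2 is not None and s2 is not None:
--             feats.append(f"t[-2]={p2.casefold()}")
--             feats.append(f"t[+2]={s2.casefold()}")
--         if len(tok) > 1: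
--             feats.append(_suffix_feature(tok, 1))
--             if len(tok) > 2:
--                 feats.append(_suffix_feature(tok, 2))
--                 if len(tok) > 3:
--                     feats.append(_suffix_feature(tok, 3))
--         out.append(feats)
--     return out
-- ===== Notes on version B (the rewrite author's own statement) =====
-- stated objective: alternative
-- what changed: B precomputes four None-padded shifted context streams (prev1/next1/prev2/next2) and zips them with the tokens, so each feature vector is built from Option-typed context values with no index arithmetic, length tests or in-place patching of earlier vectors, replacing A's four differently-shaped mutating passes over the vectors list.
import Mathlib
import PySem

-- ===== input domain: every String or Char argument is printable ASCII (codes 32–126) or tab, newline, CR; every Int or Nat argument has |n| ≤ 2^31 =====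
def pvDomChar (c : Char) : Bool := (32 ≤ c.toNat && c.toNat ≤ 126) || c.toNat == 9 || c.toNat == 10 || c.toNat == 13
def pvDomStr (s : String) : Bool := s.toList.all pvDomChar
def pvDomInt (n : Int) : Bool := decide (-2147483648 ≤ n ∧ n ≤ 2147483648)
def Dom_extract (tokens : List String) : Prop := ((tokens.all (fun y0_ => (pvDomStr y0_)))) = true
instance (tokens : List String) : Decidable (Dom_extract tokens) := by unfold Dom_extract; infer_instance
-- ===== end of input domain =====

-- B precomputes four None-padded shifted context streams and zips them with the tokens,
-- building each vector from Option-typed context values with no index arithmetic or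
-- in-place patching of earlier vectors; same results, an alternative decomposition.


-- ===== PORT A =====
-- str.casefold is ported as PySem.Str.lower: exact on the ASCII domain (Dom_extract).
def sufFeat (token : String) (size : Int) : String :=
  "suf" ++ PySem.Int.toStr size ++ "=" ++ PySem.Str.lower (PySem.Str.slice token (some (-size)) none)

-- the suffix-cascade code (identical in both Pythons): appends suf1/suf2/suf3 guarded by len(token)
def sufCascade (token : String) (vector : List String) : List String :=
  if PySem.Str.len token > 1 then
    let vector := vector ++ [sufFeat token 1]
    if PySem.Str.len token > 2 then
      let vector := vector ++ [sufFeat token 2]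
      if PySem.Str.len token > 3 then vector ++ [sufFeat token 3] else vector
    else vector
  else vector

def extract (tokens : List String) : List (List String) :=
  let vectors := tokens.map (fun token => ["t[0]=" ++ PySem.Str.lower token])
  -- vectors[0].append / vectors[-1].append: Python raises IndexError on [] (excluded by Pre_extract)
  let vectors := vectors.modify 0 (fun v => v ++ ["__BOS__"])
  let vectors := vectors.modify (vectors.length - 1) (fun v => v ++ ["__EOS__"])
  let vectors :=
    if tokens.length > 1 then
      let vectors :=
        (PySem.List.pyRange 1 ((tokens.length : Int) - 1)).foldl
          (fun vs i =>
            let prevF := "t[-1]=" ++ PySem.Str.lower (PySem.List.pyGetD tokens (i - 1) "")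
            let nextF := "t[+1]=" ++ PySem.Str.lower (PySem.List.pyGetD tokens (i + 1) "")
            vs.modify i.toNat (fun v => v ++ [prevF, nextF, prevF ++ "^" ++ nextF]))
          vectors
      if tokens.length > 2 then
        (PySem.List.pyRange 2 ((tokens.length : Int) - 2)).foldl
          (fun vs i =>
            vs.modify i.toNat (fun v =>
              v ++ ["t[-2]=" ++ PySem.Str.lower (PySem.List.pyGetD tokens (i - 2) ""),
                    "t[+2]=" ++ PySem.Str.lower (PySem.List.pyGetD tokens (i + 2) "")]))
          vectors
      else vectors
    else vectors
  (PySem.List.enumerate tokens).foldl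
    (fun vs p => vs.modify p.1.toNat (sufCascade p.2)) vectors

-- ===== PORT B =====
-- the loop body of Source B: one vector from the token and its four Option-typed context values
def ctxVec (tok : String) (p1 s1 p2 s2 : Option String) : List String :=
  let feats := ["t[0]=" ++ PySem.Str.lower tok]
  let feats := if p1 = none then feats ++ ["__BOS__"] else feats
  let feats := if s1 = none then feats ++ ["__EOS__"] else feats
  let feats :=
    match p1, s1 with
    | some p, some s =>
        let pf := "t[-1]=" ++ PySem.Str.lower p
        let nf := "t[+1]=" ++ PySem.Str.lower s
        feats ++ [pf, nf, pf ++ "^" ++ nf]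
    | _, _ => feats
  let feats :=
    match p2, s2 with
    | some p, some s =>
        feats ++ ["t[-2]=" ++ PySem.Str.lower p, "t[+2]=" ++ PySem.Str.lower s]
    | _, _ => feats
  sufCascade tok feats

def extract_alt (tokens : List String) : List (List String) :=
  let prev1 : List (Option String) := [none] ++ tokens.dropLast.map some
  let next1 : List (Option String) := (tokens.drop 1).map some ++ [none]
  let prev2 : List (Option String) := [none, none] ++ tokens.dropLast.dropLast.map some
  let next2 : List (Option String) := (tokens.drop 2).map some ++ [none, none]
  (((tokens.zip prev1).zip next1).zip (prev2.zip next2)).map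
    (fun x => ctxVec x.1.1.1 x.1.1.2 x.1.2 x.2.1 x.2.2)

-- ===== PRECONDITION & SPEC =====
-- A raises IndexError on the empty list (vectors[0] on []); Pre_ excludes exactly that input.
def Pre_extract (tokens : List String) : Prop := tokens ≠ []
instance (tokens : List String) : Decidable (Pre_extract tokens) := by unfold Pre_extract; infer_instance
def pvWitness_extract : List String := ["the", "cat", "sat"]

def Spec_extract (tokens : List String) (out : List (List String)) : Prop := out = extract_alt tokens
instance (tokens : List String) (out : List (List String)) : Decidable (Spec_extract tokens out) := by unfold Spec_extract; infer_instance

-- ===== CLAIM (what is proved, stated in full; the proofs are below) =====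
def Claim_equal_extract : Prop := ∀ (tokens : List String), Dom_extract tokens → Pre_extract tokens → Spec_extract tokens (extract tokens)

-- ===== LEMMAS AND PROOFS =====
lemma getElem?_foldl_pyRange_modify (g : Int → List String → List String) (b : Int)
    (k : Nat) : ∀ (m : Nat) (a : Int), 0 ≤ a → (b - a).toNat = m →
    ∀ (vs : List (List String)),
    ((PySem.List.pyRange a b).foldl (fun vs i => vs.modify i.toNat (g i)) vs)[k]?
      = vs[k]?.map (fun v => if a ≤ (k : Int) ∧ (k : Int) < b then g (k : Int) v else v) := by
  intro m
  induction m with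
  | zero =>
    intro a ha hm vs
    rw [PySem.List.pyRange_one_eq_nil (by omega)]
    simp only [List.foldl_nil]
    cases vs[k]? with
    | none => simp
    | some v => simp only [Option.map_some]; rw [if_neg (by omega)]
  | succ m ih =>
    intro a ha hm vs
    rw [PySem.List.pyRange_one_cons (by omega)]
    simp only [List.foldl_cons]
    rw [ih (a + 1) (by omega) (by omega), List.getElem?_modify]
    cases vs[k]? with
    | none => simp
    | some v =>
      simp only [Option.map_some, Option.map_eq_map]
      by_cases hka : (k : Int) = a
      · have h1 : a.toNat = k := by omega
        rw [if_pos h1, if_neg (by omega), if_pos (by omega)]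
        rw [hka]
      · have h1 : a.toNat ≠ k := by omega
        rw [if_neg h1]
        by_cases hc : a + 1 ≤ (k : Int) ∧ (k : Int) < b
        · rw [if_pos hc, if_pos (by omega)]
        · rw [if_neg hc, if_neg (by omega)]

lemma getElem?_foldl_enumerate_modify (h : String → List String → List String) :
    ∀ (toks : List String) (s k : Nat) (vs : List (List String)),
    ((PySem.List.enumerate toks (s : Int)).foldl (fun vs p => vs.modify p.1.toNat (h p.2)) vs)[k]?
      = vs[k]?.map (fun v => if s ≤ k ∧ k < s + toks.length then h (toks.getD (k - s) "") v else v) := by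
  intro toks
  induction toks with
  | nil =>
    intro s k vs
    simp only [PySem.List.enumerate, List.foldl_nil]
    cases vs[k]? with
    | none => simp
    | some v =>
      simp only [Option.map_some]
      rw [if_neg (by simp only [List.length_nil]; omega)]
  | cons x xs ih =>
    intro s k vs
    rw [PySem.List.enumerate_cons]
    simp only [List.foldl_cons]
    have hcast : ((s : Int) + 1) = ((s + 1 : Nat) : Int) := by omega
    rw [hcast, ih (s + 1), List.getElem?_modify]
    have htn : (s : Int).toNat = s := by omega
    cases vs[k]? with
    | none => simp
    | some v =>
      simp only [Option.map_some, Option.map_eq_map]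
      by_cases hks : k = s
      · subst hks
        rw [if_neg (show ¬(k + 1 ≤ k ∧ k < k + 1 + xs.length) by omega), if_pos htn,
            if_pos (show k ≤ k ∧ k < k + (x :: xs).length by simp only [List.length_cons]; omega)]
        simp only [Nat.sub_self, List.getD_cons_zero]
      · by_cases hc : s + 1 ≤ k ∧ k < s + 1 + xs.length
        · have hgd : xs.getD (k - (s + 1)) "" = (x :: xs).getD (k - s) "" := by
            have hk2 : k - s = (k - (s + 1)) + 1 := by omega
            rw [hk2, List.getD_cons_succ]
          rw [if_pos hc, if_neg (show ¬(↑s : Int).toNat = k by omega),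
              if_pos (show s ≤ k ∧ k < s + (x :: xs).length by simp only [List.length_cons]; omega), hgd]
        · rw [if_neg hc, if_neg (show ¬(↑s : Int).toNat = k by omega),
              if_neg (show ¬(s ≤ k ∧ k < s + (x :: xs).length) by simp only [List.length_cons]; omega)]

-- the value extract computes at index k (A reduced to a per-index closed form)
def fusedVec (tokens : List String) (k : Nat) (tok : String) : List String :=
  let n := tokens.length
  let v := ["t[0]=" ++ PySem.Str.lower tok]
  let v := if 0 = k then v ++ ["__BOS__"] else v
  let v := if n - 1 = k then v ++ ["__EOS__"] else v
  let v := if 1 ≤ (k : Int) ∧ (k : Int) < (n : Int) - 1 then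
      let pf := "t[-1]=" ++ PySem.Str.lower (PySem.List.pyGetD tokens ((k : Int) - 1) "")
      let nf := "t[+1]=" ++ PySem.Str.lower (PySem.List.pyGetD tokens ((k : Int) + 1) "")
      v ++ [pf, nf, pf ++ "^" ++ nf] else v
  let v := if 2 ≤ (k : Int) ∧ (k : Int) < (n : Int) - 2 then
      v ++ ["t[-2]=" ++ PySem.Str.lower (PySem.List.pyGetD tokens ((k : Int) - 2) ""),
            "t[+2]=" ++ PySem.Str.lower (PySem.List.pyGetD tokens ((k : Int) + 2) "")] else v
  sufCascade tok v

lemma extract_getElem? (tokens : List String) (k : Nat) :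
    (extract tokens)[k]? = tokens[k]?.map (fusedVec tokens k) := by
  simp only [extract]
  have hEnum := getElem?_foldl_enumerate_modify (fun t v => sufCascade t v) tokens 0 k
  simp only [Nat.cast_zero, Nat.zero_add, Nat.sub_zero, Nat.zero_le, true_and] at hEnum
  rw [hEnum]
  by_cases hk : k < tokens.length
  case neg =>
    have hget : tokens[k]? = none := List.getElem?_eq_none (by omega)
    rw [hget]
    by_cases h1 : tokens.length > 1
    · rw [if_pos h1]
      by_cases h2 : tokens.length > 2
      · rw [if_pos h2]
        rw [getElem?_foldl_pyRange_modify _ _ k ((tokens.length : Int) - 2 - 2).toNat 2 (by omega) rfl]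
        rw [getElem?_foldl_pyRange_modify _ _ k ((tokens.length : Int) - 1 - 1).toNat 1 (by omega) rfl]
        rw [List.getElem?_modify, List.getElem?_modify, List.getElem?_map, hget]
        simp
      · rw [if_neg h2]
        rw [getElem?_foldl_pyRange_modify _ _ k ((tokens.length : Int) - 1 - 1).toNat 1 (by omega) rfl]
        rw [List.getElem?_modify, List.getElem?_modify, List.getElem?_map, hget]
        simp
    · rw [if_neg h1]
      rw [List.getElem?_modify, List.getElem?_modify, List.getElem?_map, hget]
      simp
  case pos =>
    have hget : tokens[k]? = some (tokens[k]'hk) := List.getElem?_eq_getElem hk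
    have hgetD : tokens.getD k "" = tokens[k]'hk := by
      simp [List.getD_eq_getElem?_getD, hget]
    have r1 : ((k : Int) = 0) = (0 = k) := propext (by omega)
    have r2 : ((k : Int) = (tokens.length : Int) - 1) = (tokens.length - 1 = k) := propext (by omega)
    by_cases h1 : tokens.length > 1
    · rw [if_pos h1]
      by_cases h2 : tokens.length > 2
      · rw [if_pos h2]
        rw [getElem?_foldl_pyRange_modify _ _ k ((tokens.length : Int) - 2 - 2).toNat 2 (by omega) rfl]
        rw [getElem?_foldl_pyRange_modify _ _ k ((tokens.length : Int) - 1 - 1).toNat 1 (by omega) rfl]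
        rw [List.getElem?_modify, List.getElem?_modify, List.getElem?_map, hget]
        simp only [Option.map_eq_map, Option.map_some,
          List.length_modify, List.length_map, Option.some.injEq]
        rw [if_pos hk, hgetD]
        simp only [fusedVec]
      · rw [if_neg h2]
        have r4 : (2 ≤ (k : Int) ∧ (k : Int) < (tokens.length : Int) - 2) = False :=
          propext (iff_false_intro (by omega))
        rw [getElem?_foldl_pyRange_modify _ _ k ((tokens.length : Int) - 1 - 1).toNat 1 (by omega) rfl]
        rw [List.getElem?_modify, List.getElem?_modify, List.getElem?_map, hget]
        simp only [Option.map_eq_map, Option.map_some,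
          List.length_modify, List.length_map, Option.some.injEq]
        rw [if_pos hk, hgetD]
        simp only [fusedVec, r4, if_false]
    · rw [if_neg h1]
      have r3 : (1 ≤ (k : Int) ∧ (k : Int) < (tokens.length : Int) - 1) = False :=
        propext (iff_false_intro (by omega))
      have r4 : (2 ≤ (k : Int) ∧ (k : Int) < (tokens.length : Int) - 2) = False :=
        propext (iff_false_intro (by omega))
      rw [List.getElem?_modify, List.getElem?_modify, List.getElem?_map, hget]
      simp only [Option.map_eq_map, Option.map_some,
        List.length_modify, List.length_map, Option.some.injEq]
      rw [if_pos hk, hgetD]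
      simp only [fusedVec, r3, r4, if_false]

lemma zip_getElem?' {α β : Type} (l1 : List α) (l2 : List β) (k : Nat) :
    (l1.zip l2)[k]? = match l1[k]?, l2[k]? with
      | some a, some b => some (a, b)
      | _, _ => none := by
  cases h1 : l1[k]? <;> cases h2 : l2[k]? <;>
    simp [List.zip, List.getElem?_zipWith, h1, h2]

lemma prev1_getElem? (tokens : List String) (k : Nat) (hk : k < tokens.length) :
    ([none] ++ tokens.dropLast.map some)[k]?
      = some (if k = 0 then none else some (tokens.getD (k - 1) "")) := by
  cases k with
  | zero => simp
  | succ j =>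
    rw [List.getElem?_append_right (by simp)]
    have he : j + 1 - [(none : Option String)].length = j := by simp
    rw [he, List.getElem?_map, List.getElem?_dropLast,
      if_pos (show j < tokens.length - 1 by omega)]
    have hj : tokens[j]? = some (tokens.getD j "") := by
      rw [List.getD_eq_getElem?_getD, List.getElem?_eq_getElem (by omega)]
      simp
    rw [hj]
    simp

lemma next1_getElem? (tokens : List String) (k : Nat) (hk : k < tokens.length) :
    ((tokens.drop 1).map some ++ [none])[k]?
      = some (if k + 1 < tokens.length then some (tokens.getD (k + 1) "") else none) := by
  by_cases h : k + 1 < tokens.length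
  · rw [List.getElem?_append_left (by simp; omega), List.getElem?_map, List.getElem?_drop]
    have hj : tokens[1 + k]? = some (tokens.getD (k + 1) "") := by
      rw [List.getD_eq_getElem?_getD, List.getElem?_eq_getElem (by omega),
        List.getElem?_eq_getElem (by omega)]
      simp only [Option.getD_some, Option.some.injEq]
      congr 1
      omega
    rw [hj]
    simp [h]
  · rw [List.getElem?_append_right (by simp; omega)]
    have h0 : k - ((tokens.drop 1).map some).length = 0 := by simp; omega
    rw [h0]
    simp [h]

lemma prev2_getElem? (tokens : List String) (k : Nat) (hk : k < tokens.length) :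
    ([none, none] ++ tokens.dropLast.dropLast.map some)[k]?
      = some (if 2 ≤ k then some (tokens.getD (k - 2) "") else none) := by
  match k with
  | 0 => simp
  | 1 => simp
  | (j + 2) =>
    rw [List.getElem?_append_right (by simp)]
    simp only [List.length_cons, List.length_nil, Nat.add_sub_cancel, List.getElem?_map,
      List.getElem?_dropLast]
    rw [if_pos (show j < tokens.length - 1 by omega)]
    have hj : tokens[j]? = some (tokens.getD j "") := by
      rw [List.getD_eq_getElem?_getD, List.getElem?_eq_getElem (by omega)]
      simp
    rw [hj]
    simp
    omega

lemma next2_getElem? (tokens : List String) (k : Nat) (hk : k < tokens.length) :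
    ((tokens.drop 2).map some ++ [none, none])[k]?
      = some (if k + 2 < tokens.length then some (tokens.getD (k + 2) "") else none) := by
  by_cases h : k + 2 < tokens.length
  · rw [List.getElem?_append_left (by simp; omega), List.getElem?_map, List.getElem?_drop]
    have hj : tokens[2 + k]? = some (tokens.getD (k + 2) "") := by
      rw [List.getD_eq_getElem?_getD, List.getElem?_eq_getElem (by omega),
        List.getElem?_eq_getElem (by omega)]
      simp only [Option.getD_some, Option.some.injEq]
      congr 1
      omega
    rw [hj]
    simp [h]
  · rw [List.getElem?_append_right (by simp; omega)]
    have h0 : k - ((tokens.drop 2).map some).length ≤ 1 := by simp; omega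
    interval_cases hkk : (k - ((tokens.drop 2).map some).length) <;> simp [h]

lemma extract_alt_getElem? (tokens : List String) (k : Nat) (hk : k < tokens.length) :
    (extract_alt tokens)[k]?
      = some (ctxVec (tokens.getD k "")
          (if k = 0 then none else some (tokens.getD (k - 1) ""))
          (if k + 1 < tokens.length then some (tokens.getD (k + 1) "") else none)
          (if 2 ≤ k then some (tokens.getD (k - 2) "") else none)
          (if k + 2 < tokens.length then some (tokens.getD (k + 2) "") else none)) := by
  simp only [extract_alt, List.getElem?_map]
  rw [zip_getElem?', zip_getElem?', zip_getElem?', zip_getElem?',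
    prev1_getElem? tokens k hk, next1_getElem? tokens k hk,
    prev2_getElem? tokens k hk, next2_getElem? tokens k hk]
  have hj : tokens[k]? = some (tokens.getD k "") := by
    rw [List.getD_eq_getElem?_getD, List.getElem?_eq_getElem hk]
    simp
  rw [hj]
  simp

lemma fused_eq_ctx (tokens : List String) (k : Nat) (hk : k < tokens.length) :
    fusedVec tokens k (tokens.getD k "")
      = ctxVec (tokens.getD k "")
          (if k = 0 then none else some (tokens.getD (k - 1) ""))
          (if k + 1 < tokens.length then some (tokens.getD (k + 1) "") else none)
          (if 2 ≤ k then some (tokens.getD (k - 2) "") else none)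
          (if k + 2 < tokens.length then some (tokens.getD (k + 2) "") else none) := by
  have pg : ∀ (j : Nat), j < tokens.length →
      ∀ (i : Int), i = (j : Int) → PySem.List.pyGetD tokens i "" = tokens.getD j "" := by
    intro j hj i hi
    subst hi
    rw [PySem.List.pyGetD_natCast]
  have c1 : ((0 : Nat) = k) = (k = 0) := propext eq_comm
  have c2 : (tokens.length - 1 = k) = ¬(k + 1 < tokens.length) := propext (by omega)
  have c3 : (1 ≤ (k : Int) ∧ (k : Int) < (tokens.length : Int) - 1)
      = (¬k = 0 ∧ k + 1 < tokens.length) := propext (by omega)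
  have c4 : (2 ≤ (k : Int) ∧ (k : Int) < (tokens.length : Int) - 2)
      = (2 ≤ k ∧ k + 2 < tokens.length) := propext (by omega)
  simp only [fusedVec, ctxVec, c1, c2, c3, c4]
  by_cases h0 : k = 0
  · by_cases hL : k + 1 < tokens.length
    · by_cases h3 : k + 2 < tokens.length <;> simp [h0, h3]
    · simp [h0, hL]
  · by_cases hL : k + 1 < tokens.length
    · by_cases h2 : 2 ≤ k <;> by_cases h3 : k + 2 < tokens.length
      · simp [h0, hL, h2, h3,
          pg (k - 1) (by omega) ((k : Int) - 1) (by omega),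
          pg (k + 1) (by omega) ((k : Int) + 1) (by omega),
          pg (k - 2) (by omega) ((k : Int) - 2) (by omega),
          pg (k + 2) (by omega) ((k : Int) + 2) (by omega)]
      · simp [h0, hL, h2, h3,
          pg (k - 1) (by omega) ((k : Int) - 1) (by omega),
          pg (k + 1) (by omega) ((k : Int) + 1) (by omega)]
      · simp [h0, hL, h2, h3,
          pg (k - 1) (by omega) ((k : Int) - 1) (by omega),
          pg (k + 1) (by omega) ((k : Int) + 1) (by omega)]
      · simp [h0, hL, h2, h3,
          pg (k - 1) (by omega) ((k : Int) - 1) (by omega),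
          pg (k + 1) (by omega) ((k : Int) + 1) (by omega)]
    · by_cases h2 : 2 ≤ k <;>
        simp [h0, hL, h2, show ¬k + 2 < tokens.length by omega]

-- ===== VERDICT =====
theorem extract_spec : Claim_equal_extract := by
  unfold Claim_equal_extract
  intro tokens _ hpre
  unfold Spec_extract
  apply List.ext_getElem?
  intro k
  rw [extract_getElem?]
  by_cases hk : k < tokens.length
  · have hj : tokens[k]? = some (tokens.getD k "") := by
      rw [List.getD_eq_getElem?_getD, List.getElem?_eq_getElem hk]
      simp
    rw [extract_alt_getElem? tokens k hk, hj, Option.map_some, fused_eq_ctx tokens k hk]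
  · rw [List.getElem?_eq_none (by omega)]
    have : (extract_alt tokens)[k]? = none := by
      apply List.getElem?_eq_none
      simp only [extract_alt, List.length_map, List.length_zip]
      omega
    rw [this]
    simp
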